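-- pv_equiv track=rewrite | github.com/unaiesvaz/Choose_Your_Story | M3/functions.py | getFormatedBodyColumns
-- ===== SOURCE A (Python) =====
-- def getFormatedBodyColumns(tupla_texts, tupla_sizes, margin=0): # Nos sirve para tener formato correcto en algunos apartados como las respuestas mas usadas en informes
--     columnas = []
--     for i in range(len(tupla_texts)):
--         texto = tupla_texts[i]
--         ancho = tupla_sizes[i]
--
--         palabras = texto.split()
--         lineas = []
--         linea_actual = ""
--
--         for palabra in palabras:
--             if len(linea_actual) + len(palabra) + 1 <= ancho:
--                 if linea_actual:
--                     linea_actual += " " + palabra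
--                 else:
--                     linea_actual = palabra
--             else:
--                 if linea_actual:
--                     lineas.append(linea_actual)
--                 linea_actual = palabra
--
--         if linea_actual:
--             lineas.append(linea_actual)
--
--         columnas.append(lineas)
--
--     max_lineas = 0
--     for col in columnas:
--         if len(col) > max_lineas:
--             max_lineas = len(col)
--
--     for col in columnas:
--         while len(col) < max_lineas:
--             col.append("")
--
--     resultado = ""
--     for fila in range(max_lineas):
--         for i in range(len(columnas)):
--             texto_linea = columnas[i][fila].ljust(tupla_sizes[i])
--             resultado += texto_linea
--
--             if i < len(columnas) - 1:
--                 resultado += " " * margin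
--
--         resultado += "\n"
--
--     return resultado
-- ===== SOURCE B (Python) =====
-- def _cumul(palabras):
--     # q[k] = sum of len(w)+1 over the first k words; strictly increasing
--     q = [0]
--     for p in palabras:
--         q.append(q[-1] + len(p) + 1)
--     return q
--
-- def _bisect_right(q, x, lo):
--     # first index k in [lo, len(q)] with q[k] > x (q increasing on that range)
--     hi = len(q)
--     while lo < hi:
--         mid = (lo + hi) // 2
--         if q[mid] <= x:
--             lo = mid + 1
--         else:
--             hi = mid
--     return lo
--
-- def getFormatedBodyColumns(tupla_texts, tupla_sizes, margin=0):
--     # Wrap by prefix sums + binary search: words i..j-1 form one line iff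
--     # q[j] - q[i] <= ancho + 1, so each break point is found by bisection.
--     columnas = []
--     for texto, ancho in zip(tupla_texts, tupla_sizes):
--         palabras = texto.split()
--         q = _cumul(palabras)
--         lineas = []
--         i = 0
--         while i < len(palabras):
--             j = max(_bisect_right(q, q[i] + ancho + 1, i + 1) - 1, i + 1)
--             lineas.append(" ".join(palabras[i:j]))
--             i = j
--         columnas.append(lineas)
--     n = max((len(c) for c in columnas), default=0)
--     sep = " " * margin
--     return "".join(
--         sep.join((col[f] if f < len(col) else "").ljust(w)
--                  for col, w in zip(columnas, tupla_sizes))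
--         + "\n"
--         for f in range(n)
--     )
-- ===== Notes on version B (the rewrite author's own statement) =====
-- stated objective: alternative
-- what changed: B replaces A's word-by-word accumulator wrap with a prefix-sum + binary-search line breaker (q[k]=sum of len(word)+1; a line from word i ends at the largest j with q[j]-q[i] <= ancho+1, found by bisection, forced to at least one word), and builds the table by joining padded cells per row instead of A's pad-to-max mutation plus nested index loops with string +=.
import Mathlib
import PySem

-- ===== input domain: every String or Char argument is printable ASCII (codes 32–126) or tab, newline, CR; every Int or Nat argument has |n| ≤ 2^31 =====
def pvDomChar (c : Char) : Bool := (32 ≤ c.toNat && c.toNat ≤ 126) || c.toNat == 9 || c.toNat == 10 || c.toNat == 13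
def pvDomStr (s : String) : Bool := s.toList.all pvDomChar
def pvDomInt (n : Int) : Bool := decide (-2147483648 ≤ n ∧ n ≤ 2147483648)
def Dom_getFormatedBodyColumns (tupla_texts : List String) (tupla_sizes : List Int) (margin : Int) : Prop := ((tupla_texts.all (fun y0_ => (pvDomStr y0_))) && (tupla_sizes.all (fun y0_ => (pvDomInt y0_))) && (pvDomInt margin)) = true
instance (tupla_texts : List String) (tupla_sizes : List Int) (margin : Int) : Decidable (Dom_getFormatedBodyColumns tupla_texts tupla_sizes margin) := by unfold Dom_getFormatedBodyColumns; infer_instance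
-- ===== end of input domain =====

-- B wraps each column by prefix sums over word lengths plus a hand-written binary search for
-- each line's break point, and assembles the table as a join of per-row joins instead of A's
-- pad-to-max + nested index loops with string +=; equivalence of the RETURN value is proved on
-- Pre_ (texts not longer than sizes; beyond that A raises IndexError).

-- ===== PORT A =====
-- ' ' * n  (exact: empty for n ≤ 0)
def pvSpaces (n : Int) : List Char := List.replicate n.toNat ' '
-- s.ljust(w)  (exact: pad with spaces up to width w, no-op if w ≤ len(s))
def pvLjust (s : List Char) (w : Int) : List Char := s ++ List.replicate (w - s.length).toNat ' '

-- body of A's 'for palabra in palabras' loop; state = (lineas, linea_actual)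
def pvStepA (ancho : Int) (st : List (List Char) × List Char) (palabra : List Char) :
    List (List Char) × List Char :=
  if (st.2.length : Int) + (palabra.length : Int) + 1 ≤ ancho then
    if st.2.isEmpty = false then (st.1, st.2 ++ ' ' :: palabra) else (st.1, palabra)
  else
    if st.2.isEmpty = false then (st.1 ++ [st.2], palabra) else (st.1, palabra)

-- trailing 'if linea_actual: lineas.append(linea_actual)'
def pvFinishA (st : List (List Char) × List Char) : List (List Char) :=
  if st.2.isEmpty = false then st.1 ++ [st.2] else st.1

-- one iteration of A's outer 'for i in range(len(tupla_texts))' loop body (building one column)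
def pvColA (texto : String) (ancho : Int) : List (List Char) :=
  pvFinishA ((PySem.Chars.split₀ texto.toList).foldl (pvStepA ancho) ([], []))

-- 'while len(col) < max_lineas: col.append("")'
def pvPadA (col : List (List Char)) (m : Int) : List (List Char) :=
  if (col.length : Int) < m then pvPadA (col ++ [[]]) m else col
termination_by (m - col.length).toNat
decreasing_by simp; omega

def getFormatedBodyColumns (tupla_texts : List String) (tupla_sizes : List Int) (margin : Int) : String :=
  let columnas := (List.range tupla_texts.length).foldl
    (fun cols i => cols ++ [pvColA (tupla_texts.getD i "") (tupla_sizes.getD i 0)]) []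
  let max_lineas := columnas.foldl
    (fun m col => if m < (col.length : Int) then (col.length : Int) else m) 0
  let padded := columnas.map (fun col => pvPadA col max_lineas)
  let resultado := (List.range max_lineas.toNat).foldl (fun res fila =>
    ((List.range columnas.length).foldl (fun res i =>
        let res := res ++ pvLjust ((padded.getD i []).getD fila []) (tupla_sizes.getD i 0)
        if i < columnas.length - 1 then res ++ pvSpaces margin else res)
      res) ++ ['\n']) []
  String.mk resultado

-- ===== PORT B =====
-- Source B _cumul: q = [0]; for p in palabras: q.append(q[-1] + len(p) + 1)   (q[-1] = getLastD)
def pvCumulB (ws : List (List Char)) : List Int :=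
  ws.foldl (fun q p => q ++ [q.getLastD 0 + (p.length : Int) + 1]) [0]

-- termination facts for the two loops below (cited by name in decreasing_by)
lemma pvBisect_dec1 (lo hi : Nat) (h : lo < hi) : hi - ((lo + hi) / 2 + 1) < hi - lo := by omega
lemma pvBisect_dec2 (lo hi : Nat) (h : lo < hi) : (lo + hi) / 2 - lo < hi - lo := by omega
lemma pvLines_dec (a i len : Nat) (h : i < len) : len - max a (i + 1) < len - i := by omega

-- Source B _bisect_right: hand-written binary search (hi starts at len(q); all indexing in range)
def pvBisectB (q : List Int) (x : Int) (lo hi : Nat) : Nat :=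
  if lo < hi then
    let mid := (lo + hi) / 2
    if q.getD mid 0 ≤ x then pvBisectB q x (mid + 1) hi else pvBisectB q x lo mid
  else lo
termination_by hi - lo
decreasing_by
  · exact pvBisect_dec1 lo hi (by omega)
  · exact pvBisect_dec2 lo hi (by omega)

-- Source B 'while i < len(palabras)' loop; palabras[i:j] with 0 ≤ i ≤ j is (drop i).take (j-i)
def pvLinesB (ws : List (List Char)) (q : List Int) (ancho : Int) (i : Nat) : List (List Char) :=
  if h : i < ws.length then
    let j := max (pvBisectB q (q.getD i 0 + ancho + 1) (i + 1) q.length - 1) (i + 1)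
    PySem.Chars.join [' '] ((ws.drop i).take (j - i)) :: pvLinesB ws q ancho j
  else []
termination_by ws.length - i
decreasing_by
  exact pvLines_dec _ i ws.length h

def getFormatedBodyColumns_alt (tupla_texts : List String) (tupla_sizes : List Int) (margin : Int) : String :=
  let columnas := (tupla_texts.zip tupla_sizes).map (fun p =>
    let palabras := PySem.Chars.split₀ p.1.toList
    pvLinesB palabras (pvCumulB palabras) p.2 0)
  let n := (PySem.List.max? (columnas.map (fun c => (c.length : Int))) (fun x => x)).getD 0
  let sep := pvSpaces margin
  let rows := (List.range n.toNat).map (fun f =>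
    PySem.Chars.join sep ((columnas.zip tupla_sizes).map (fun p => pvLjust (p.1.getD f []) p.2))
      ++ ['\n'])
  String.mk rows.flatten

-- ===== PRECONDITION & SPEC =====
-- Pre_ excludes only the inputs where A raises IndexError: fewer sizes than texts.
def Pre_getFormatedBodyColumns (tupla_texts : List String) (tupla_sizes : List Int) (margin : Int) : Prop :=
  tupla_texts.length ≤ tupla_sizes.length
instance (tupla_texts : List String) (tupla_sizes : List Int) (margin : Int) : Decidable (Pre_getFormatedBodyColumns tupla_texts tupla_sizes margin) := by unfold Pre_getFormatedBodyColumns; infer_instance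

def pvWitness_getFormatedBodyColumns : List String × List Int × Int := (["hello world", "ab"], [5, 4], 1)

def Spec_getFormatedBodyColumns (tupla_texts : List String) (tupla_sizes : List Int) (margin : Int) (out : String) : Prop := out = getFormatedBodyColumns_alt tupla_texts tupla_sizes margin
instance (tupla_texts : List String) (tupla_sizes : List Int) (margin : Int) (out : String) : Decidable (Spec_getFormatedBodyColumns tupla_texts tupla_sizes margin out) := by unfold Spec_getFormatedBodyColumns; infer_instance

-- ===== CLAIM (what is proved, stated in full; the proofs are below) =====
def Claim_equal_getFormatedBodyColumns : Prop := ∀ (tupla_texts : List String) (tupla_sizes : List Int) (margin : Int), Dom_getFormatedBodyColumns tupla_texts tupla_sizes margin → Pre_getFormatedBodyColumns tupla_texts tupla_sizes margin → Spec_getFormatedBodyColumns tupla_texts tupla_sizes margin (getFormatedBodyColumns tupla_texts tupla_sizes margin)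



-- ===== LEMMAS AND PROOFS =====

-- proof-side intermediate wrap: greedy grouping on the word list (start a line with one word,
-- absorb following words while they fit); A's accumulator loop and B's bisection both equal it
def pvAbsorbB (ancho : Int) (linea : List Char) (palabras : List (List Char)) :
    List Char × List (List Char) :=
  match palabras with
  | [] => (linea, [])
  | p :: rest =>
    if (linea.length : Int) + (p.length : Int) + 1 ≤ ancho then
      pvAbsorbB ancho (linea ++ ' ' :: p) rest
    else (linea, p :: rest)

lemma pvAbsorbB_snd_length (ancho : Int) (linea : List Char) (palabras : List (List Char)) :
    (pvAbsorbB ancho linea palabras).2.length ≤ palabras.length := by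
  induction palabras generalizing linea with
  | nil => simp [pvAbsorbB]
  | cons p rest ih =>
    simp only [pvAbsorbB]
    split
    · exact le_trans (ih _) (by simp)
    · simp

def pvWrapB (palabras : List (List Char)) (ancho : Int) : List (List Char) :=
  match palabras with
  | [] => []
  | p :: rest =>
    (pvAbsorbB ancho p rest).1 :: pvWrapB (pvAbsorbB ancho p rest).2 ancho
termination_by palabras.length
decreasing_by
  have := pvAbsorbB_snd_length ancho p rest
  simp; omega

-- every word produced by str.split() is nonempty
lemma split₀_go_ne_nil : ∀ (s cur : List Char) (acc : List (List Char)), (∀ w ∈ acc, w ≠ []) →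
    ∀ w ∈ PySem.Chars.split₀.go s cur acc, w ≠ [] := by
  intro s
  induction s with
  | nil =>
    intro cur acc hacc w hw
    simp only [PySem.Chars.split₀.go] at hw
    split at hw
    · exact hacc w (by simpa using hw)
    · rename_i h
      simp at hw
      rcases hw with h1 | h2
      · exact hacc w h1
      · subst h2; simp only [ne_eq, List.reverse_eq_nil_iff]
        simpa [List.isEmpty_iff] using h
  | cons c rest ih =>
    intro cur acc hacc w hw
    simp only [PySem.Chars.split₀.go] at hw
    split at hw
    · split at hw
      · exact ih [] acc hacc w hw
      · rename_i h
        refine ih [] (cur.reverse :: acc) ?_ w hw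
        intro v hv
        rcases List.mem_cons.mp hv with h1 | h2
        · subst h1; simp only [ne_eq, List.reverse_eq_nil_iff]; simpa [List.isEmpty_iff] using h
        · exact hacc v h2
    · exact ih (c :: cur) acc hacc w hw

lemma split₀_ne_nil (s : List Char) : ∀ w ∈ PySem.Chars.split₀ s, w ≠ [] := by
  intro w hw
  exact split₀_go_ne_nil s [] [] (by simp) w hw

-- A's accumulator word-wrap loop computes the greedy grouping
lemma wrap_core (ancho : Int) (ws : List (List Char)) : ∀ (lineas : List (List Char)) (cur : List Char),
    cur ≠ [] → (∀ w ∈ ws, w ≠ []) →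
    pvFinishA (ws.foldl (pvStepA ancho) (lineas, cur)) =
      lineas ++ (pvAbsorbB ancho cur ws).1 :: pvWrapB (pvAbsorbB ancho cur ws).2 ancho := by
  induction ws with
  | nil =>
    intro lineas cur hcur _
    simp [pvFinishA, pvAbsorbB, pvWrapB, hcur]
  | cons v vs ih =>
    intro lineas cur hcur hws
    have hcurE : cur.isEmpty = false := by simp [hcur]
    by_cases h : (cur.length : Int) + (v.length : Int) + 1 ≤ ancho
    · rw [List.foldl_cons,
        show pvStepA ancho (lineas, cur) v = (lineas, cur ++ ' ' :: v) from by
          simp [pvStepA, h, hcurE],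
        show pvAbsorbB ancho cur (v :: vs) = pvAbsorbB ancho (cur ++ ' ' :: v) vs from by
          simp [pvAbsorbB, h]]
      exact ih lineas (cur ++ ' ' :: v) (by simp) (fun w hw => hws w (List.mem_cons_of_mem _ hw))
    · have hv : v ≠ [] := hws v List.mem_cons_self
      rw [List.foldl_cons,
        show pvStepA ancho (lineas, cur) v = (lineas ++ [cur], v) from by
          simp [pvStepA, h, hcurE],
        show pvAbsorbB ancho cur (v :: vs) = (cur, v :: vs) from by
          simp only [pvAbsorbB, if_neg h],
        ih (lineas ++ [cur]) v hv (fun w hw => hws w (List.mem_cons_of_mem _ hw)),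
        pvWrapB]
      simp

lemma pvColA_eq (texto : String) (ancho : Int) :
    pvColA texto ancho = pvWrapB (PySem.Chars.split₀ texto.toList) ancho := by
  unfold pvColA
  rcases hsplit : PySem.Chars.split₀ texto.toList with _ | ⟨w, ws⟩
  · simp [pvFinishA, pvWrapB]
  · have hne := split₀_ne_nil texto.toList
    rw [hsplit] at hne
    rw [List.foldl_cons,
      show pvStepA ancho ([], []) w = ([], w) from by
        by_cases h : (0 : Int) + (w.length : Int) + 1 ≤ ancho <;> simp [pvStepA],
      wrap_core ancho ws [] w (hne w List.mem_cons_self)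
        (fun v hv => hne v (List.mem_cons_of_mem _ hv)),
      pvWrapB]
    simp

-- ---- prefix-sum / bisection side ----

-- recursive normal form of Source B's _cumul output
def qFrom (a : Int) : List (List Char) → List Int
  | [] => [a]
  | w :: t => a :: qFrom (a + w.length + 1) t

lemma cumul_go (ws : List (List Char)) : ∀ (pre : List Int) (a : Int),
    ws.foldl (fun q p => q ++ [q.getLastD 0 + (p.length : Int) + 1]) (pre ++ [a]) =
      pre ++ qFrom a ws := by
  induction ws with
  | nil => intro pre a; simp [qFrom]
  | cons w t ih =>
    intro pre a
    rw [List.foldl_cons,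
      show (pre ++ [a]).getLastD 0 = a from by simp,
      ih (pre ++ [a]) (a + w.length + 1)]
    simp [qFrom]

lemma pvCumulB_eq (ws : List (List Char)) : pvCumulB ws = qFrom 0 ws := by
  have := cumul_go ws [] 0
  simpa [pvCumulB] using this

lemma qFrom_length (a : Int) (ws : List (List Char)) : (qFrom a ws).length = ws.length + 1 := by
  induction ws generalizing a with
  | nil => simp [qFrom]
  | cons w t ih => simp [qFrom, ih]

lemma qFrom_getD_zero (a : Int) (ws : List (List Char)) : (qFrom a ws).getD 0 0 = a := by
  cases ws <;> rfl

lemma qFrom_step (ws : List (List Char)) : ∀ (a : Int) (k : Nat), k < ws.length →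
    (qFrom a ws).getD (k + 1) 0 =
      (qFrom a ws).getD k 0 + ((ws.getD k []).length : Int) + 1 := by
  induction ws with
  | nil => intro a k h; simp at h
  | cons w t ih =>
    intro a k h
    cases k with
    | zero =>
      simp only [qFrom, List.getD_cons_succ, List.getD_cons_zero, qFrom_getD_zero]
    | succ m =>
      have hm : m < t.length := by simpa using h
      simpa [qFrom] using ih (a + w.length + 1) m hm

lemma qFrom_mono (ws : List (List Char)) (a0 : Int) : ∀ {i j : Nat}, i ≤ j → j ≤ ws.length →
    (qFrom a0 ws).getD i 0 ≤ (qFrom a0 ws).getD j 0 := by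
  intro i j hij hj
  induction j with
  | zero => simp_all
  | succ m ih =>
    rcases Nat.lt_succ_iff_lt_or_eq.mp (Nat.lt_succ_of_le hij) with h | h
    · have hm : m < ws.length := by omega
      calc (qFrom a0 ws).getD i 0 ≤ (qFrom a0 ws).getD m 0 := ih (by omega) (by omega)
        _ ≤ (qFrom a0 ws).getD (m + 1) 0 := by
            rw [qFrom_step ws a0 m hm]
            have h0 : (0 : Int) ≤ ((ws.getD m []).length : Int) := Int.natCast_nonneg _
            linarith
    · rw [h]

-- characterization of Source B's hand-written binary search on a monotone list
lemma bisect_char (q : List Int) (x : Int)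
    (hm : ∀ a b : Nat, a ≤ b → b < q.length → q.getD a 0 ≤ q.getD b 0) :
    ∀ (lo hi : Nat), lo ≤ hi → hi ≤ q.length →
      lo ≤ pvBisectB q x lo hi ∧ pvBisectB q x lo hi ≤ hi ∧
      (∀ k, lo ≤ k → k < pvBisectB q x lo hi → q.getD k 0 ≤ x) ∧
      (∀ k, pvBisectB q x lo hi ≤ k → k < hi → x < q.getD k 0) := by
  intro lo hi
  fun_induction pvBisectB q x lo hi with
  | case1 lo hi hlt mid hle ih =>
    intro _ hhi
    have hmid : lo ≤ mid ∧ mid < hi := by omega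
    obtain ⟨h1, h2, h3, h4⟩ := ih (by omega) hhi
    refine ⟨by omega, h2, ?_, h4⟩
    intro k hk1 hk2
    by_cases hk : mid + 1 ≤ k
    · exact h3 k hk hk2
    · exact le_trans (hm k mid (by omega) (by omega)) hle
  | case2 lo hi hlt mid hgt ih =>
    intro _ hhi
    have hmid : lo ≤ mid ∧ mid < hi := by omega
    obtain ⟨h1, h2, h3, h4⟩ := ih (by omega) (by omega)
    refine ⟨h1, by omega, h3, ?_⟩
    intro k hk1 hk2
    by_cases hk : k < mid
    · exact h4 k hk1 hk
    · exact lt_of_lt_of_le (lt_of_not_ge hgt) (hm mid k (by omega) (by omega))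
  | case3 lo hi h =>
    intro hlo _
    exact ⟨le_rfl, hlo, by omega, by omega⟩

-- proof-side index form of the greedy absorb: extend the line while the next word fits
def gAbs (q : List Int) (x : Int) (len j : Nat) : Nat :=
  if j < len ∧ q.getD (j + 1) 0 ≤ x then gAbs q x len (j + 1) else j
termination_by len - j
decreasing_by omega

lemma gAbs_stop (q : List Int) (x : Int) (len j : Nat)
    (h : ¬ j < len ∨ x < q.getD (j + 1) 0) : gAbs q x len j = j := by
  rw [gAbs, if_neg]
  rintro ⟨h1, h2⟩
  rcases h with h | h
  · exact h h1
  · exact absurd h2 (not_le.mpr h)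

lemma gAbs_eq_of (q : List Int) (x : Int) (len : Nat) : ∀ (n j m : Nat), m - j ≤ n →
    j ≤ m → m ≤ len →
    (∀ k, j ≤ k → k < m → q.getD (k + 1) 0 ≤ x) → (m = len ∨ x < q.getD (m + 1) 0) →
    gAbs q x len j = m := by
  intro n
  induction n with
  | zero =>
    intro j m h1 h2 hlen hall hstop
    have hjm : j = m := by omega
    subst hjm
    apply gAbs_stop
    rcases hstop with h | h
    · left; omega
    · right; exact h
  | succ n ih =>
    intro j m h1 h2 hlen hall hstop
    by_cases hjm : j = m
    · subst hjm
      apply gAbs_stop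
      rcases hstop with h | h
      · left; omega
      · right; exact h
    · rw [gAbs, if_pos ⟨by omega, hall j le_rfl (by omega)⟩]
      exact ih (j + 1) m (by omega) (by omega) hlen
        (fun k hk1 hk2 => hall k (by omega) hk2) hstop

-- " ".join over a snoc
lemma join_snoc : ∀ (xs : List (List Char)) (y : List Char), xs ≠ [] →
    PySem.Chars.join [' '] (xs ++ [y]) = PySem.Chars.join [' '] xs ++ ' ' :: y := by
  intro xs
  induction xs with
  | nil => intro y h; exact absurd rfl h
  | cons a l ih =>
    intro y _
    cases l with
    | nil =>
      rw [List.cons_append, List.nil_append,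
        PySem.Chars.join_cons_cons [' '] a y [], PySem.Chars.join_singleton,
        PySem.Chars.join_singleton]
      simp
    | cons b l' =>
      show PySem.Chars.join [' '] (a :: b :: (l' ++ [y])) = _
      rw [PySem.Chars.join_cons_cons [' '] a b (l' ++ [y]),
        show b :: (l' ++ [y]) = (b :: l') ++ [y] from rfl,
        ih y (by simp), PySem.Chars.join_cons_cons [' '] a b l']
      simp

-- the greedy absorb, started on words i..j-1, lands exactly at gAbs (fuel n bounds len-j)
lemma absorb_eq (ws : List (List Char)) (q : List Int) (hq : q = qFrom 0 ws)
    (ancho : Int) (i : Nat) :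
    ∀ (n j : Nat) (line : List Char), ws.length - j ≤ n → i < j → j ≤ ws.length →
      (line.length : Int) = q.getD j 0 - q.getD i 0 - 1 →
      line = PySem.Chars.join [' '] ((ws.drop i).take (j - i)) →
      pvAbsorbB ancho line (ws.drop j) =
        (PySem.Chars.join [' ']
            ((ws.drop i).take (gAbs q (q.getD i 0 + ancho + 1) ws.length j - i)),
          ws.drop (gAbs q (q.getD i 0 + ancho + 1) ws.length j)) := by
  intro n
  induction n with
  | zero =>
    intro j line h1 h2 h3 hlen hline
    rw [gAbs_stop q _ ws.length j (Or.inl (by omega)),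
      List.drop_of_length_le (by omega : ws.length ≤ j), ← hline]
    rfl
  | succ n ih =>
    intro j line h1 h2 h3 hlen hline
    by_cases hj : j < ws.length
    · have hstep : q.getD (j + 1) 0 = q.getD j 0 + ((ws[j].length : Nat) : Int) + 1 := by
        have := qFrom_step ws 0 j hj
        rw [List.getD_eq_getElem ws [] hj] at this
        rw [hq]; exact this
      rw [List.drop_eq_getElem_cons hj]
      by_cases c : (line.length : Int) + (ws[j].length : Int) + 1 ≤ ancho
      · have hfit : q.getD (j + 1) 0 ≤ q.getD i 0 + ancho + 1 := by omega
        have hg : gAbs q (q.getD i 0 + ancho + 1) ws.length j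
            = gAbs q (q.getD i 0 + ancho + 1) ws.length (j + 1) := by
          rw [gAbs, if_pos ⟨hj, hfit⟩]
        have htk : (ws.drop i).take (j + 1 - i) = (ws.drop i).take (j - i) ++ [ws[j]] := by
          rw [show j + 1 - i = (j - i) + 1 from by omega, List.take_succ, List.getElem?_drop,
            show i + (j - i) = j from by omega, List.getElem?_eq_getElem hj]
          rfl
        have hne : (ws.drop i).take (j - i) ≠ [] := by
          have hlt : ((ws.drop i).take (j - i)).length = j - i := by
            rw [List.length_take, List.length_drop]; omega
          intro hEmpty; rw [hEmpty] at hlt; simp at hlt; omega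
        rw [show pvAbsorbB ancho line (ws[j] :: ws.drop (j + 1))
            = pvAbsorbB ancho (line ++ ' ' :: ws[j]) (ws.drop (j + 1)) from by
          simp only [pvAbsorbB]; rw [if_pos c], hg]
        apply ih (j + 1) (line ++ ' ' :: ws[j]) (by omega) (by omega) (by omega)
        · have : (line ++ ' ' :: ws[j]).length = line.length + (ws[j].length + 1) := by simp
          rw [this]; push_cast; omega
        · rw [htk, join_snoc _ _ hne, ← hline]
      · have hnofit : q.getD i 0 + ancho + 1 < q.getD (j + 1) 0 := by omega
        rw [gAbs_stop q _ ws.length j (Or.inr hnofit), ← hline]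
        simp only [pvAbsorbB]
        rw [if_neg c, List.drop_eq_getElem_cons hj]
    · rw [gAbs_stop q _ ws.length j (Or.inl (by omega)),
        List.drop_of_length_le (by omega : ws.length ≤ j), ← hline]
      rfl

-- A's greedy wrap = B's bisection lines, from any start index (fuel n bounds len-i)
lemma wrap_eq_lines (ws : List (List Char)) (q : List Int) (hq : q = qFrom 0 ws) (ancho : Int) :
    ∀ (n i : Nat), ws.length - i ≤ n → i ≤ ws.length →
      pvWrapB (ws.drop i) ancho = pvLinesB ws q ancho i := by
  intro n
  induction n with
  | zero =>
    intro i h1 h2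
    rw [List.drop_of_length_le (by omega : ws.length ≤ i), pvLinesB, dif_neg (by omega)]
    simp [pvWrapB]
  | succ n ih =>
    intro i h1 h2
    by_cases hi : i < ws.length
    · have hqlen : q.length = ws.length + 1 := by rw [hq]; exact qFrom_length 0 ws
      have hmono : ∀ a b : Nat, a ≤ b → b < q.length → q.getD a 0 ≤ q.getD b 0 := by
        intro a b hab hb
        rw [hq]
        exact qFrom_mono ws 0 hab (by omega)
      obtain ⟨hr1, hr2, hr3, hr4⟩ := bisect_char q (q.getD i 0 + ancho + 1) hmono
        (i + 1) q.length (by omega) le_rfl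
      have hgabs : gAbs q (q.getD i 0 + ancho + 1) ws.length (i + 1)
          = max (pvBisectB q (q.getD i 0 + ancho + 1) (i + 1) q.length - 1) (i + 1) := by
        apply gAbs_eq_of q _ ws.length
          (max (pvBisectB q (q.getD i 0 + ancho + 1) (i + 1) q.length - 1) (i + 1))
          (i + 1) _ (by omega) (le_max_right _ _) (by omega)
        · intro k hk1 hk2
          exact hr3 (k + 1) (by omega) (by omega)
        · by_cases hm : max (pvBisectB q (q.getD i 0 + ancho + 1) (i + 1) q.length - 1) (i + 1)
              = ws.length
          · exact Or.inl hm
          · refine Or.inr (hr4 _ (by omega) (by omega))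
      have hstep : q.getD (i + 1) 0 = q.getD i 0 + ((ws[i].length : Nat) : Int) + 1 := by
        have := qFrom_step ws 0 i hi
        rw [List.getD_eq_getElem ws [] hi] at this
        rw [hq]; exact this
      have habs := absorb_eq ws q hq ancho i (ws.length - (i + 1)) (i + 1) (ws[i])
        le_rfl (by omega) (by omega) (by omega)
        (by rw [show i + 1 - i = 1 from by omega, List.drop_eq_getElem_cons hi,
              List.take_succ_cons, List.take_zero, PySem.Chars.join_singleton])
      have hmax_le : max (pvBisectB q (q.getD i 0 + ancho + 1) (i + 1) q.length - 1) (i + 1)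
          ≤ ws.length := by omega
      rw [List.drop_eq_getElem_cons hi, pvWrapB, habs, hgabs,
        ih _ (by omega) hmax_le]
      conv_rhs => rw [pvLinesB]
      rw [dif_pos hi]
    · rw [List.drop_of_length_le (by omega : ws.length ≤ i), pvLinesB, dif_neg (by omega)]
      simp [pvWrapB]

lemma col_eq (texto : String) (ancho : Int) :
    pvColA texto ancho =
      pvLinesB (PySem.Chars.split₀ texto.toList)
        (pvCumulB (PySem.Chars.split₀ texto.toList)) ancho 0 := by
  rw [pvColA_eq, pvCumulB_eq,
    ← wrap_eq_lines (PySem.Chars.split₀ texto.toList) _ rfl ancho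
      (PySem.Chars.split₀ texto.toList).length 0 (by omega) (Nat.zero_le _),
    List.drop_zero]

-- ---- shared normal form of the row assembly ----
def pvCols (texts : List String) (sizes : List Int) : List (List (List Char)) :=
  (texts.zip sizes).map (fun p =>
    pvLinesB (PySem.Chars.split₀ p.1.toList) (pvCumulB (PySem.Chars.split₀ p.1.toList)) p.2 0)

def pvMaxN (cols : List (List (List Char))) : Int :=
  (cols.map (fun c => (c.length : Int))).foldl max 0

def pvNorm (texts : List String) (sizes : List Int) (margin : Int) : List Char :=
  ((List.range (pvMaxN (pvCols texts sizes)).toNat).map (fun f =>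
    PySem.Chars.join (pvSpaces margin) ((List.range (pvCols texts sizes).length).map (fun i =>
      pvLjust (((pvCols texts sizes).getD i []).getD f []) (sizes.getD i 0))) ++ ['\n'])).flatten

lemma maxA_eq (cols : List (List (List Char))) :
    cols.foldl (fun m col => if m < (col.length : Int) then (col.length : Int) else m) 0 =
      pvMaxN cols := by
  unfold pvMaxN
  rw [List.foldl_map]
  apply PySem.List.foldl_congr_mem
  intro acc x _
  by_cases h : acc < (x.length : Int)
  · simp [h, max_eq_right h.le]
  · simp [h, max_eq_left (not_lt.mp h)]

lemma maxB_eq (cols : List (List (List Char))) :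
    ((PySem.List.max? (cols.map (fun c => (c.length : Int))) (fun x => x)).getD 0) =
      pvMaxN cols := by
  unfold pvMaxN
  rcases cols with _ | ⟨c, t⟩
  · simp [PySem.List.max?]
  · rw [List.map_cons, PySem.List.max?_id_cons]
    simp only [Option.getD_some, List.foldl_cons]
    have h0 : max (0 : Int) (c.length : Int) = (c.length : Int) :=
      max_eq_right (by positivity)
    rw [h0]

-- padding never changes a getD-with-[]-default lookup
lemma pvPadA_getD (col : List (List Char)) (m : Int) (f : Nat) :
    (pvPadA col m).getD f [] = col.getD f [] := by
  fun_induction pvPadA col m with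
  | case1 col h ih =>
    rw [ih]
    rcases lt_trichotomy f col.length with h | h | h
    · rw [List.getD_append _ _ _ _ h, List.getD_eq_getElem _ _ h]
    · subst h
      simp [List.getD]
    · rw [List.getD, List.getD, List.getElem?_eq_none (by simp; omega),
        List.getElem?_eq_none (by omega)]
  | case2 => rfl

-- an index loop over two parallel lists is a map over their zip
lemma map_range_eq_map_zip {α β γ : Type} (xs : List α) (ys : List β) (dx : α) (dy : β)
    (h : xs.length ≤ ys.length) (g : α → β → γ) :
    (List.range xs.length).map (fun i => g (xs.getD i dx) (ys.getD i dy)) =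
      (xs.zip ys).map (fun p => g p.1 p.2) := by
  apply List.ext_getElem
  · simp [Nat.min_eq_left h]
  · intro i h1 h2
    simp only [List.getElem_map, List.getElem_range, List.getElem_zip]
    have hx : i < xs.length := by simpa using h1
    have hy : i < ys.length := lt_of_lt_of_le hx h
    rw [List.getD_eq_getElem _ _ hx, List.getD_eq_getElem _ _ hy]

lemma join_append_singleton (sep : List Char) (xs : List (List Char)) (x : List Char) :
    PySem.Chars.join sep (xs ++ [x]) = xs.flatMap (fun y => y ++ sep) ++ x := by
  induction xs with
  | nil => simp [PySem.Chars.join, List.intercalate]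
  | cons y ys ih =>
    rcases ys with _ | ⟨z, zs⟩
    · simp [PySem.Chars.join, List.intercalate]
    · show PySem.Chars.join sep (y :: ((z :: zs) ++ [x])) = _
      rw [show PySem.Chars.join sep (y :: ((z :: zs) ++ [x])) =
            y ++ sep ++ PySem.Chars.join sep ((z :: zs) ++ [x]) from by
        simp [PySem.Chars.join, List.intercalate, List.intersperse]]
      rw [ih]
      simp

-- A's inner index loop (cell ++ optional margin) is one joined row
lemma inner_row (sep : List Char) (n : Nat) (c : Nat → List Char) (res0 : List Char) :
    (List.range n).foldl (fun res i =>
        if i < n - 1 then (res ++ c i) ++ sep else res ++ c i) res0 =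
      res0 ++ PySem.Chars.join sep ((List.range n).map c) := by
  cases n with
  | zero => simp [PySem.Chars.join, List.intercalate]
  | succ m =>
    rw [List.range_succ, List.foldl_append,
      PySem.List.foldl_congr_mem (List.range m) _ (fun res i => res ++ (c i ++ sep)) res0
        (by intro acc x hx
            have hxm : x < m := List.mem_range.mp hx
            simp [hxm]),
      PySem.List.foldl_append_eq_flatMap]
    simp only [List.foldl_cons, List.foldl_nil, show ¬ (m < m + 1 - 1) from by omega, if_false]
    rw [List.map_append, List.map_singleton, join_append_singleton, List.flatMap_map]
    simp

lemma A_eq_norm (texts : List String) (sizes : List Int) (margin : Int)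
    (hPre : texts.length ≤ sizes.length) :
    getFormatedBodyColumns texts sizes margin = String.mk (pvNorm texts sizes margin) := by
  have hcols : (List.range texts.length).foldl
      (fun cols i => cols ++ [pvColA (texts.getD i "") (sizes.getD i 0)]) [] =
        pvCols texts sizes := by
    rw [PySem.List.foldl_append_singleton_eq_map, List.nil_append,
      show (fun i => pvColA (texts.getD i "") (sizes.getD i 0)) =
          (fun i => pvLinesB (PySem.Chars.split₀ (texts.getD i "").toList)
            (pvCumulB (PySem.Chars.split₀ (texts.getD i "").toList)) (sizes.getD i 0) 0) from
        funext (fun i => col_eq _ _)]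
    exact map_range_eq_map_zip texts sizes "" 0 hPre
      (fun t a => pvLinesB (PySem.Chars.split₀ t.toList)
        (pvCumulB (PySem.Chars.split₀ t.toList)) a 0)
  simp only [getFormatedBodyColumns]
  rw [hcols, maxA_eq]
  congr 1
  unfold pvNorm
  rw [PySem.List.foldl_congr_mem (List.range (pvMaxN (pvCols texts sizes)).toNat) _
      (fun res fila => res ++
        (PySem.Chars.join (pvSpaces margin) ((List.range (pvCols texts sizes).length).map (fun i =>
          pvLjust (((pvCols texts sizes).getD i []).getD fila []) (sizes.getD i 0))) ++ ['\n'])) []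
      ?_,
    PySem.List.foldl_append_eq_flatMap, List.nil_append, List.flatMap_def]
  · intro acc fila _
    rw [inner_row (pvSpaces margin) (pvCols texts sizes).length
      (fun i => pvLjust (((pvCols texts sizes).map (fun col =>
          pvPadA col (pvMaxN (pvCols texts sizes)))).getD i [] |>.getD fila [])
        (sizes.getD i 0)) acc]
    rw [List.append_assoc]
    congr 3
    apply List.map_congr_left
    intro i hi
    have hi' : i < (pvCols texts sizes).length := List.mem_range.mp hi
    congr 1
    rw [show ((pvCols texts sizes).map (fun col =>
          pvPadA col (pvMaxN (pvCols texts sizes)))).getD i [] =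
        pvPadA ((pvCols texts sizes).getD i []) (pvMaxN (pvCols texts sizes)) from by
      rw [List.getD_eq_getElem _ _ (by simpa using hi'), List.getElem_map,
        List.getD_eq_getElem _ _ hi']]
    exact pvPadA_getD _ _ _

lemma B_eq_norm (texts : List String) (sizes : List Int) (margin : Int) :
    getFormatedBodyColumns_alt texts sizes margin = String.mk (pvNorm texts sizes margin) := by
  have hlen : (pvCols texts sizes).length ≤ sizes.length := by
    simp [pvCols]
  simp only [getFormatedBodyColumns_alt]
  rw [show (texts.zip sizes).map (fun p =>
      pvLinesB (PySem.Chars.split₀ p.1.toList) (pvCumulB (PySem.Chars.split₀ p.1.toList)) p.2 0) =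
      pvCols texts sizes from rfl, maxB_eq]
  congr 1
  unfold pvNorm
  congr 1
  apply List.map_congr_left
  intro f _
  congr 2
  exact (map_range_eq_map_zip (pvCols texts sizes) sizes [] 0 hlen
    (fun c w => pvLjust (c.getD f []) w)).symm

-- ===== VERDICT (by name: the statement is the Claim_ definition above) =====
theorem getFormatedBodyColumns_spec : Claim_equal_getFormatedBodyColumns := by
  intro texts sizes margin _ hPre
  unfold Spec_getFormatedBodyColumns
  rw [A_eq_norm texts sizes margin hPre, B_eq_norm texts sizes margin]
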